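-- pv_equiv track=rewrite | github.com/sultanovemil/PP_3_URFU | streamlit/app.py | capitalize_and_punctuate
-- ===== SOURCE A (Python) =====
-- def capitalize_and_punctuate(text):
--     # Извлекаем часть текста после последнего двоеточия
--     text = text.split(":")[-1].strip()
--
--     # Разделяем текст на предложения по общим знакам препинания
--     sentences = []
--     current_sentence = []
--     for char in text:
--         current_sentence.append(char)
--         # Если встречаем знак конца предложения, добавляем его в список предложений
--         if char in '.!?':
--             sentences.append(''.join(current_sentence).strip())
--             current_sentence = []
--
--     # Если остался текст, добавляем его как последнее предложение
--     if current_sentence: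
--         sentences.append(''.join(current_sentence).strip())
--
--     # Обрабатываем каждое предложение, чтобы сделать первую букву заглавной
--     corrected_sentences = []
--     for sentence in sentences:
--         if sentence:
--             # Делаем первую букву заглавной и добавляем точку в конце, если её нет
--             corrected_sentence = sentence[0].upper() + sentence[1:]
--             if not corrected_sentence.endswith('.'):
--                 corrected_sentence += '.'
--             corrected_sentences.append(corrected_sentence)
--
--     # Объединяем все исправленные предложения в финальный текст
--     final_text = ' '.join(corrected_sentences)
--     return final_text
-- ===== SOURCE B (Python) =====
-- def _fix(s):
--     t = s[0].upper() + s[1:]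
--     return t if t.endswith('.') else t + '.'
--
-- def capitalize_and_punctuate(text):
--     text = text.split(":")[-1].strip()
--     # cut the text after every '.', '!' or '?' (trailing terminator-less run kept, possibly empty)
--     chunks = []
--     start = 0
--     for i, ch in enumerate(text):
--         if ch in '.!?':
--             chunks.append(text[start:i + 1])
--             start = i + 1
--     chunks.append(text[start:])
--     return ' '.join(_fix(s) for s in map(str.strip, chunks) if s)
-- ===== Notes on version B (the rewrite author's own statement) =====
-- stated objective: alternative
-- what changed: A's two accumulator loops (char-by-char sentence accumulation into a growing list, then a second correcting loop with an explicit result accumulator) are replaced by one enumerate pass that records cut points and takes chunks as slices of the text, followed by a strip/filter/fix generator pipeline joined at the end.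
import Mathlib
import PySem

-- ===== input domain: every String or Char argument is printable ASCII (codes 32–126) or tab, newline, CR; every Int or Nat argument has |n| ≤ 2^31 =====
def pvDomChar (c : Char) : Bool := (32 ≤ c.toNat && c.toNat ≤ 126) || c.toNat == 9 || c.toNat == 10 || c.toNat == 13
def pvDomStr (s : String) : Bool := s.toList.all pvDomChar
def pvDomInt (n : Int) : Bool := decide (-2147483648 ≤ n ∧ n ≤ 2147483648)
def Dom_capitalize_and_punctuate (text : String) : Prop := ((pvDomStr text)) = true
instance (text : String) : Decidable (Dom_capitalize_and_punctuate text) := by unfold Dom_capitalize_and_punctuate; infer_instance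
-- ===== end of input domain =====

-- B replaces A's two accumulator loops (manual char accumulation, then a correcting loop)
-- by a recursive chunker plus a strip/filter/fix pipeline: an alternative decomposition, not faster.

-- ===== PORT A =====
def capitalize_and_punctuate (text : String) : String :=
  -- text = text.split(":")[-1].strip()   (split on ":" never yields [], so [-1] never raises; .getD [] is unreachable)
  let t := PySem.Chars.strip ((PySem.List.pyGet? (PySem.Chars.splitOn text.toList [':']) (-1)).getD [])
  -- first loop: accumulate chars, close a sentence on '.', '!' or '?'
  let p := t.foldl (fun (p : List (List Char) × List Char) c =>
      let cur := p.2 ++ [c]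
      if c ∈ ['.', '!', '?'] then (p.1 ++ [PySem.Chars.strip cur], []) else (p.1, cur)) ([], [])
  -- if current_sentence: sentences.append(...)
  let sents := if p.2 ≠ [] then p.1 ++ [PySem.Chars.strip p.2] else p.1
  -- second loop: capitalize and punctuate each non-empty sentence
  let corrected := sents.foldl (fun acc s =>
      match s with
      | [] => acc
      | c :: rest =>
        let cor := PySem.Chars.upperChar c :: rest
        let cor := if ¬ (PySem.Chars.endswith cor ['.'] = true) then cor ++ ['.'] else cor
        acc ++ [cor]) []
  String.ofList (PySem.Chars.join [' '] corrected)

-- ===== PORT B =====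
-- _fix: capitalize the first char, append '.' unless already there (only called on non-empty s)
def pvFix (s : List Char) : List Char :=
  match s with
  | [] => []
  | c :: rest =>
    let t := PySem.Chars.upperChar c :: rest
    if PySem.Chars.endswith t ['.'] then t else t ++ ['.']

def capitalize_and_punctuate_alt (text : String) : String :=
  let t := PySem.Chars.strip ((PySem.List.pyGet? (PySem.Chars.splitOn text.toList [':']) (-1)).getD [])
  -- one enumerate pass recording cut points; chunks are slices of the text
  let p := (PySem.List.enumerate t).foldl (fun (p : List (List Char) × Int) ic =>
      if ic.2 ∈ ['.', '!', '?'] then (p.1 ++ [PySem.Chars.slice t (some p.2) (some (ic.1 + 1))], ic.1 + 1)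
      else p) ([], 0)
  let chunks := p.1 ++ [PySem.Chars.slice t (some p.2) none]
  String.ofList (PySem.Chars.join [' ']
    (((chunks.map PySem.Chars.strip).filter (fun s => !s.isEmpty)).map pvFix))

-- ===== PRECONDITION & SPEC =====
def Spec_capitalize_and_punctuate (text : String) (out : String) : Prop := out = capitalize_and_punctuate_alt text
instance (text : String) (out : String) : Decidable (Spec_capitalize_and_punctuate text out) := by unfold Spec_capitalize_and_punctuate; infer_instance

-- ===== CLAIM (what is proved, stated in full; the proofs are below) =====
def Claim_equal_capitalize_and_punctuate : Prop := ∀ (text : String), Dom_capitalize_and_punctuate text → Spec_capitalize_and_punctuate text (capitalize_and_punctuate text)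

-- ===== LEMMAS AND PROOFS =====

-- the chunk list (split after every terminator), as a structural recursion (proof helper)
def pvChunks : List Char → List (List Char)
  | [] => [[]]
  | c :: rest =>
    if c ∈ ['.', '!', '?'] then [c] :: pvChunks rest
    else match pvChunks rest with
      | [] => [[c]]   -- unreachable: pvChunks always returns at least one chunk
      | h :: tl => (c :: h) :: tl

def pvConsHead (cur : List Char) : List (List Char) → List (List Char)
  | [] => [cur]
  | h :: tl => (cur ++ h) :: tl

-- the sentence list A's first loop produces, as a recursion over the text
def pvProc : List Char → List Char → List (List Char)
  | cur, [] => if cur ≠ [] then [PySem.Chars.strip cur] else []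
  | cur, c :: rest =>
    if c ∈ ['.', '!', '?'] then PySem.Chars.strip (cur ++ [c]) :: pvProc [] rest
    else pvProc (cur ++ [c]) rest

lemma pvChunks_ne_nil (cs : List Char) : pvChunks cs ≠ [] := by
  cases cs with
  | nil => simp [pvChunks]
  | cons c rest =>
    simp only [pvChunks]
    split
    · simp
    · split <;> simp

lemma pvLoopA_eq (cs : List Char) : ∀ (sents : List (List Char)) (cur : List Char),
    (let p := cs.foldl (fun (p : List (List Char) × List Char) c =>
        let cur := p.2 ++ [c]
        if c ∈ ['.', '!', '?'] then (p.1 ++ [PySem.Chars.strip cur], []) else (p.1, cur)) (sents, cur);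
      if p.2 ≠ [] then p.1 ++ [PySem.Chars.strip p.2] else p.1) = sents ++ pvProc cur cs := by
  induction cs with
  | nil =>
    intro sents cur
    simp only [List.foldl_nil, pvProc]
    split <;> simp_all
  | cons c rest ih =>
    intro sents cur
    simp only [List.foldl_cons, pvProc]
    by_cases hc : c ∈ ['.', '!', '?']
    · simpa [hc] using ih (sents ++ [PySem.Chars.strip (cur ++ [c])]) []
    · simpa [hc] using ih sents (cur ++ [c])

lemma pvFoldB_eq (t : List Char) (u : List Char) : ∀ (acc : List (List Char)) (start k : Nat),
    start ≤ k → k ≤ t.length → u = t.drop k →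
    (let p := (PySem.List.enumerate u (k : Int)).foldl (fun (p : List (List Char) × Int) ic =>
        if ic.2 ∈ ['.', '!', '?'] then (p.1 ++ [PySem.Chars.slice t (some p.2) (some (ic.1 + 1))], ic.1 + 1)
        else p) (acc, (start : Int));
      p.1 ++ [PySem.Chars.slice t (some p.2) none])
    = acc ++ pvConsHead ((t.drop start).take (k - start)) (pvChunks u) := by
  induction u with
  | nil =>
    intro acc start k hsk hkl hu
    have hk : k = t.length := by
      have := List.drop_eq_nil_iff.mp hu.symm
      omega
    have hcur : (t.drop start).take (k - start) = t.drop start := by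
      apply List.take_of_length_le
      simp [hk]
    simp [PySem.List.enumerate, pvChunks, pvConsHead, hcur,
      PySem.List.slice_from_natCast]
  | cons c rest ih =>
    intro acc start k hsk hkl hu
    have hk : k < t.length := by
      by_contra hge
      have : t.drop k = [] := List.drop_eq_nil_iff.mpr (by omega)
      rw [this] at hu; simp at hu
    have hdc : t.drop k = t[k] :: t.drop (k + 1) := List.drop_eq_getElem_cons hk
    rw [hdc] at hu
    injection hu with hc hrest'
    have hchunk : PySem.List.slice t (some (start : Int)) (some ((k : Int) + 1))
        = (t.drop start).take (k - start) ++ [c] := by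
      have h1 : ((k : Int) + 1) = ((k + 1 : Nat) : Int) := by push_cast; ring
      rw [h1, PySem.List.slice_toNat t (by positivity) (by positivity)]
      simp only [Int.toNat_natCast]
      have h2 : k + 1 - start = (k - start) + 1 := by omega
      rw [h2, List.take_add_one]
      have h3 : (t.drop start)[k - start]? = some c := by
        rw [List.getElem?_drop]
        have : start + (k - start) = k := by omega
        rw [this, List.getElem?_eq_getElem hk, hc]
      simp [h3]
    by_cases hmem : c ∈ ['.', '!', '?']
    · have := ih (acc ++ [PySem.Chars.slice t (some (start : Int)) (some ((k : Int) + 1))])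
        (k + 1) (k + 1) (Nat.le_refl _) hk hrest'
      simp only [PySem.List.enumerate_cons, List.foldl_cons, hmem, if_pos] at this ⊢
      push_cast at this ⊢
      rw [this]
      obtain ⟨h, tl, hrestc⟩ := List.exists_cons_of_ne_nil (pvChunks_ne_nil rest)
      simp only [pvChunks, hmem, if_pos, hrestc, pvConsHead]
      simp [PySem.Chars.slice_eq_listSlice, hchunk, List.take_zero]
    · have := ih acc start (k + 1) (by omega) hk hrest'
      simp only [PySem.List.enumerate_cons, List.foldl_cons, hmem, ite_false] at this ⊢
      push_cast at this ⊢
      rw [this]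
      obtain ⟨h, tl, hrestc⟩ := List.exists_cons_of_ne_nil (pvChunks_ne_nil rest)
      have h2 : k + 1 - start = (k - start) + 1 := by omega
      have hcur : (t.drop start).take (k + 1 - start) = (t.drop start).take (k - start) ++ [c] := by
        rw [h2, List.take_add_one]
        have h3 : (t.drop start)[k - start]? = some c := by
          rw [List.getElem?_drop]
          have : start + (k - start) = k := by omega
          rw [this, List.getElem?_eq_getElem hk, hc]
        simp [h3]
      simp only [pvChunks, hmem, ite_false, hrestc, pvConsHead, hcur]
      simp

lemma pvStrip_term_ne (xs : List Char) (c : Char) (hc : PySem.Chars.isspace c = false) :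
    PySem.Chars.strip (xs ++ [c]) ≠ [] := by
  have h1 : ∃ ys, PySem.Chars.lstrip (xs ++ [c]) = ys ++ [c] := by
    simp only [PySem.Chars.lstrip, List.dropWhile_append]
    split
    · exact ⟨[], by simp [hc]⟩
    · exact ⟨List.dropWhile PySem.Chars.isspace xs, rfl⟩
  obtain ⟨ys, hys⟩ := h1
  simp only [PySem.Chars.strip, hys, PySem.Chars.rstrip]
  simp [hc]

lemma pvTerm_not_space (c : Char) (hc : c ∈ ['.', '!', '?']) : PySem.Chars.isspace c = false := by
  fin_cases hc <;> decide

lemma pvChunks_eq (cs : List Char) : ∀ (cur h : List Char) (tl : List (List Char)),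
    pvChunks cs = h :: tl →
    (pvProc cur cs).filter (fun s => !s.isEmpty)
      = (((cur ++ h) :: tl).map PySem.Chars.strip).filter (fun s => !s.isEmpty) := by
  induction cs with
  | nil =>
    intro cur h tl hch
    simp only [pvChunks] at hch
    injection hch with e1 e2
    subst e1; subst e2
    simp only [pvProc]
    by_cases hcur : cur = []
    · simp [hcur, PySem.Chars.strip, PySem.Chars.lstrip, PySem.Chars.rstrip]
    · simp [hcur]
  | cons c rest ih =>
    intro cur h tl hch
    simp only [pvChunks, pvProc] at hch ⊢
    by_cases hc : c ∈ ['.', '!', '?']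
    · simp only [hc, if_pos] at hch ⊢
      injection hch with e1 e2
      subst e1; subst e2
      obtain ⟨h', tl', hrest⟩ := List.exists_cons_of_ne_nil (pvChunks_ne_nil rest)
      have hne : (PySem.Chars.strip (cur ++ [c])).isEmpty = false := by
        have := pvStrip_term_ne cur c (pvTerm_not_space c hc)
        simpa [List.isEmpty_iff] using this
      have := ih [] h' tl' hrest
      simp only [List.nil_append] at this
      simp [List.filter_cons, hne, this, hrest]
    · simp only [hc, if_false] at hch ⊢
      obtain ⟨h', tl', hrest⟩ := List.exists_cons_of_ne_nil (pvChunks_ne_nil rest)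
      rw [hrest] at hch
      injection hch with e1 e2
      subst e1; subst e2
      have := ih (cur ++ [c]) h' tl' hrest
      simpa [List.append_assoc] using this

lemma pvPhase2_eq (l : List (List Char)) : ∀ (acc : List (List Char)),
    l.foldl (fun acc s =>
      match s with
      | [] => acc
      | c :: rest =>
        let cor := PySem.Chars.upperChar c :: rest
        let cor := if ¬ (PySem.Chars.endswith cor ['.'] = true) then cor ++ ['.'] else cor
        acc ++ [cor]) acc
    = acc ++ (l.filter (fun s => !s.isEmpty)).map pvFix := by
  induction l with
  | nil => intro acc; simp
  | cons s rest ih =>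
    intro acc
    cases s with
    | nil => simpa using ih acc
    | cons c r =>
      simp only [List.foldl_cons, List.filter_cons, List.isEmpty_cons, Bool.not_false, if_pos,
        List.map_cons, pvFix]
      rw [ih]
      by_cases he : PySem.Chars.endswith (PySem.Chars.upperChar c :: r) ['.'] = true <;>
        simp [he, List.append_assoc]

-- ===== VERDICT (by name: the statement is the Claim_ definition above) =====
theorem capitalize_and_punctuate_spec : Claim_equal_capitalize_and_punctuate := by
  intro text _
  unfold Spec_capitalize_and_punctuate capitalize_and_punctuate capitalize_and_punctuate_alt
  simp only []
  generalize PySem.Chars.strip ((PySem.List.pyGet? (PySem.Chars.splitOn text.toList [':']) (-1)).getD []) = t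
  obtain ⟨h, tl, hch⟩ := List.exists_cons_of_ne_nil (pvChunks_ne_nil t)
  have h1 := pvLoopA_eq t [] []
  simp only [List.nil_append] at h1
  have h2 := pvChunks_eq t [] h tl hch
  simp only [List.nil_append] at h2
  have hB := pvFoldB_eq t t [] 0 0 (Nat.le_refl 0) (Nat.zero_le _) (by simp)
  simp only [Nat.cast_zero, Nat.sub_zero, List.take_zero, List.drop_zero, List.nil_append, hch,
    pvConsHead] at hB
  rw [h1, pvPhase2_eq, h2, hB]
  simp
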